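-- pv_equiv track=rewrite | github.com/Jordan-Cottle/FP-Microarchitecture | Simulation/Simulation.configuration/scripts/fpAdd_test.py | isRoundingDifference
-- ===== SOURCE A (Python) =====
-- def isRoundingDifference(a,b):
--     foundDiff = False
--     for i in range(len(a)):
--         if a[i] == b[i] and not foundDiff:
--             continue
--         foundDiff = True
--         if foundDiff and a[i] == b[i]:
--             return False
--
--     return True
-- ===== SOURCE B (Python) =====
-- def isRoundingDifference(a, b):
--     eq = [x == y for x, y in zip(a, b)]
--     return eq == sorted(eq, reverse=True)
-- ===== Notes on version B (the rewrite author's own statement) =====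
-- stated objective: alternative
-- what changed: replaces the flagged index scan by building the boolean match profile of the two strings (zip) and checking it is non-increasing by comparing it with its reverse-sorted copy
import Mathlib
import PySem

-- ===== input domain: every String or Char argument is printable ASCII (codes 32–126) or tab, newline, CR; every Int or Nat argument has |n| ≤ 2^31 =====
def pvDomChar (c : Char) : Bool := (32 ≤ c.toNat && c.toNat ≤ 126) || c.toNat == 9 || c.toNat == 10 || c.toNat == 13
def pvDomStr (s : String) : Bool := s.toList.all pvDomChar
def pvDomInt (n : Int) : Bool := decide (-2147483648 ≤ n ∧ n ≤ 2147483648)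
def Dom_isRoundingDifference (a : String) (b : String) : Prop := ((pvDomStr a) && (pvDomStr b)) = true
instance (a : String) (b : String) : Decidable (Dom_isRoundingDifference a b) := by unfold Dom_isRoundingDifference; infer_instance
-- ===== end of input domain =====

-- B replaces A's flagged index scan by a declarative check: build the boolean match
-- profile of the two strings (zip) and verify it is non-increasing by comparing it with
-- its reverse-sorted copy; an alternative algorithm of similar cost.


-- ===== PORT A =====
-- single pass over indices of a carrying the foundDiff flag; when b is shorter than a the
-- Python raises IndexError (Pre_ excludes that), here the recursion just returns true
def goA : List Char → List Char → Bool → Bool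
  | [], _, _ => true
  | _ :: _, [], _ => true            -- Python: IndexError; outside Pre_
  | ca :: a', cb :: b', found =>
    if ca == cb && !found then goA a' b' found
    else if ca == cb then false      -- foundDiff and a[i] == b[i]
    else goA a' b' true

def isRoundingDifference (a : String) (b : String) : Bool :=
  goA a.toList b.toList false

-- ===== PORT B =====
-- eq = [x == y for x, y in zip(a, b)]; return eq == sorted(eq, reverse=True)
def isRoundingDifference_alt (a : String) (b : String) : Bool :=
  let eq := (a.toList.zip b.toList).map (fun p => p.1 == p.2)
  eq == PySem.List.sorted eq (fun x => x) true

-- ===== PRECONDITION & SPEC =====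
-- Pre_ excludes exactly the inputs where Python A raises IndexError: b shorter than a and
-- no index i < len(b) at which A returns False (an equal pair after an earlier difference).
def Pre_isRoundingDifference (a : String) (b : String) : Prop :=
  a.toList.length ≤ b.toList.length ∨
    ∃ i < b.toList.length, a.toList[i]? = b.toList[i]? ∧
      ∃ j < i, a.toList[j]? ≠ b.toList[j]?
instance (a : String) (b : String) : Decidable (Pre_isRoundingDifference a b) := by
  unfold Pre_isRoundingDifference; infer_instance

def pvWitness_isRoundingDifference : String × String := ("ab", "ba")

def Spec_isRoundingDifference (a : String) (b : String) (out : Bool) : Prop := out = isRoundingDifference_alt a b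
instance (a : String) (b : String) (out : Bool) : Decidable (Spec_isRoundingDifference a b out) := by unfold Spec_isRoundingDifference; infer_instance

-- ===== CLAIM (what is proved, stated in full; the proofs are below) =====
def Claim_equal_isRoundingDifference : Prop := ∀ (a : String) (b : String), Dom_isRoundingDifference a b → Pre_isRoundingDifference a b → Spec_isRoundingDifference a b (isRoundingDifference a b)

-- ===== LEMMAS AND PROOFS =====

-- the match profile of the two character lists
def matchProfile (a b : List Char) : List Bool := (a.zip b).map (fun p => p.1 == p.2)

theorem goA_true_eq : ∀ a b : List Char, goA a b true = (matchProfile a b).all (fun x => !x) := by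
  intro a
  induction a with
  | nil => intro b; cases b <;> rfl
  | cons ca a' ih =>
    intro b
    cases b with
    | nil => rfl
    | cons cb b' => cases h : (ca == cb) <;> simp [goA, h, matchProfile, ih]

theorem pairwise_of_all_false : ∀ P : List Bool, (∀ x ∈ P, x = false) →
    List.Pairwise (fun x y => y ≤ x) P := by
  intro P
  induction P with
  | nil => intro _; exact List.Pairwise.nil
  | cons p P' ih =>
    intro h
    refine List.Pairwise.cons ?_ (ih fun x hx => h x (by simp [hx]))
    intro x hx
    simp [h x (by simp [hx]), h p (by simp)]

theorem all_not_eq_decide_pairwise (P : List Bool) :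
    (P.all fun x => !x) = decide ((∀ x ∈ P, x ≤ false) ∧ List.Pairwise (fun x y => y ≤ x) P) := by
  by_cases hall : ∀ x ∈ P, x = false
  · have h1 : P.all (fun x => !x) = true := List.all_eq_true.mpr fun x hx => by simp [hall x hx]
    simp [h1, pairwise_of_all_false _ hall]
    left
    intro hc
    simpa using hall true hc
  · push Not at hall
    obtain ⟨x, hx, hxf⟩ := hall
    have hxt : x = true := by
      cases x with
      | false => exact absurd rfl hxf
      | true => rfl
    subst hxt
    have h1 : P.all (fun x => !x) = false := List.all_eq_false.mpr ⟨true, hx, by simp⟩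
    simp [h1]
    intro hor
    rcases hor with hh | hh
    · exact absurd hx hh
    · exact absurd hh (by decide)

theorem goA_false_eq : ∀ a b : List Char,
    goA a b false = decide ((matchProfile a b).Pairwise (fun x y => y ≤ x)) := by
  intro a
  induction a with
  | nil => intro b; cases b <;> rfl
  | cons ca a' ih =>
    intro b
    cases b with
    | nil => rfl
    | cons cb b' =>
      cases h : (ca == cb)
      · simp only [goA, h, matchProfile, List.zip_cons_cons, List.map_cons, Bool.false_and,
          Bool.false_eq_true, if_false, goA_true_eq, List.pairwise_cons]
        exact all_not_eq_decide_pairwise _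
      · simp [goA, h, matchProfile, ih, List.pairwise_cons]

-- a boolean list equals its reverse-sorted copy iff it is non-increasing
theorem eq_sorted_rev_iff (l : List Bool) :
    (l == PySem.List.sorted l (fun x => x) true) = decide (l.Pairwise (fun x y => y ≤ x)) := by
  by_cases h : l.Pairwise (fun x y => y ≤ x)
  · simp [h, PySem.List.sorted_rev_eq_self_of_pairwise l (fun x => x) h]
  · simp [h]
    intro heq
    exact h (heq ▸ PySem.List.sorted_pairwise_rev l (fun x => x))

-- ===== VERDICT (by name: the statement is the Claim_ definition above) =====
theorem isRoundingDifference_spec : Claim_equal_isRoundingDifference := by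
  intro a b _ _
  unfold Spec_isRoundingDifference isRoundingDifference isRoundingDifference_alt
  rw [goA_false_eq, ← eq_sorted_rev_iff]
  rfl
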